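-- pv_equiv track=rewrite | github.com/cappe987/aoc-2021 | 12/main.py | has_double_small
-- ===== SOURCE A (Python) =====
-- from collections import defaultdict
--
-- def is_big(a):
--   return a.isupper()
--
-- def has_double_small(path):
--   di = defaultdict(lambda: 0)
--   for cave in path:
--     if not is_big(cave):
--       if di[cave] == 1:
--         return True
--       di[cave] += 1
--   return False
-- ===== SOURCE B (Python) =====
-- def is_big(a):
--   return a.isupper()
--
-- def has_double_small(path):
--   smalls = [c for c in path if not is_big(c)]
--   return len(smalls) != len(set(smalls))
-- ===== Notes on version B (the rewrite author's own statement) =====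
-- stated objective: simpler
-- what changed: Replaces the early-exit loop with a per-cave count dict by one comprehension collecting the small caves plus a single size comparison against the deduplicated set.
import Mathlib
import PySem

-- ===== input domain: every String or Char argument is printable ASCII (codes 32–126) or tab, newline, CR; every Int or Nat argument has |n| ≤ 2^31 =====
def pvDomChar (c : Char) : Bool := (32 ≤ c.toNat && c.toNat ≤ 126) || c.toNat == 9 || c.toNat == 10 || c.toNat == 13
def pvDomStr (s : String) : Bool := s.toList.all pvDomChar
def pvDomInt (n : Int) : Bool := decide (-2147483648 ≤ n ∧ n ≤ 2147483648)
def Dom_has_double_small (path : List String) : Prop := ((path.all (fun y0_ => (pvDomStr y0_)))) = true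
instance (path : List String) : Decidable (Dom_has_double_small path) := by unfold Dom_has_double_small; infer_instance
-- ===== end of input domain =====

-- B collects the small caves with one comprehension and compares its size with the size of its set,
-- replacing A's early-exit loop and per-cave count dict; objective: simpler.


-- ===== PORT A =====
-- str.isupper(): at least one cased character and no lowercase cased character;
-- exact on the ASCII domain, where the cased characters are exactly the letters.
def pyStrIsupper (s : String) : Bool :=
  s.toList.any (fun c => PySem.Chars.isupper c || PySem.Chars.islower c) &&
  s.toList.all (fun c => !PySem.Chars.islower c)

def is_big (a : String) : Bool := pyStrIsupper a

-- the for-loop of A; defaultdict reads are modelled by getD with default 0 (the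
-- implicit insertion of the default on read is unobservable through getD)
def hdsLoop (di : PySem.Dict String Int) : List String → Bool
  | [] => false
  | cave :: rest =>
    if !is_big cave then
      if di.getD cave 0 == 1 then true
      else hdsLoop (di.insert cave (di.getD cave 0 + 1)) rest
    else hdsLoop di rest

def has_double_small (path : List String) : Bool := hdsLoop PySem.Dict.empty path

-- ===== PORT B =====
def has_double_small_alt (path : List String) : Bool :=
  let smalls := path.filter (fun c => !is_big c)
  decide (smalls.length ≠ (PySem.Set.ofList smalls).length)

-- ===== PRECONDITION & SPEC =====
def Spec_has_double_small (path : List String) (out : Bool) : Prop := out = has_double_small_alt path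
instance (path : List String) (out : Bool) : Decidable (Spec_has_double_small path out) := by unfold Spec_has_double_small; infer_instance

-- ===== CLAIM (what is proved, stated in full; the proofs are below) =====
def Claim_equal_has_double_small : Prop := ∀ (path : List String), Dom_has_double_small path → Spec_has_double_small path (has_double_small path)

-- ===== LEMMAS AND PROOFS =====

-- A's loop, under the invariant that the count dict holds exactly the small caves
-- already seen (all with count 1), decides "the seen caves together with the small
-- caves still to come contain a repetition".
lemma hdsLoop_spec (l : List String) : ∀ (di : PySem.Dict String Int) (seen : List String),
    seen.Nodup →
    (∀ c, di.getD c 0 = if c ∈ seen then 1 else 0) →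
    hdsLoop di l = !decide ((seen ++ l.filter (fun c => !is_big c)).Nodup) := by
  induction l with
  | nil =>
    intro di seen hnd _
    simp [hdsLoop, hnd]
  | cons cave rest ih =>
    intro di seen hnd hdi
    by_cases hbig : is_big cave = true
    · simpa [hdsLoop, hbig] using ih di seen hnd hdi
    · have hsmall : is_big cave = false := by simpa using hbig
      by_cases hmem : cave ∈ seen
      · have h1 : di.getD cave 0 = 1 := by rw [hdi]; simp [hmem]
        have hnn : ¬ (seen ++ cave :: rest.filter (fun c => !is_big c)).Nodup := by
          intro h
          exact (List.disjoint_of_nodup_append h) hmem (by simp)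
        simp [hdsLoop, hsmall, h1, hnn]
      · have h0 : di.getD cave 0 = 0 := by rw [hdi]; simp [hmem]
        have hdi' : ∀ c, (di.insert cave (di.getD cave 0 + 1)).getD c 0 =
            if c ∈ cave :: seen then 1 else 0 := by
          intro c
          rw [PySem.Dict.getD_insert]
          by_cases hc : c = cave
          · simp [hc, h0]
          · simp [hc, hdi c]
        have hrec := ih (di.insert cave (di.getD cave 0 + 1)) (cave :: seen)
          (by simp [hnd, hmem]) hdi'
        rw [show hdsLoop di (cave :: rest) =
            hdsLoop (di.insert cave (di.getD cave 0 + 1)) rest from by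
          simp [hdsLoop, hsmall, h0]]
        rw [hrec]
        have hiff : ((cave :: seen) ++ rest.filter (fun c => !is_big c)).Nodup ↔
            (seen ++ cave :: rest.filter (fun c => !is_big c)).Nodup := by
          rw [List.cons_append]
          exact List.perm_middle.nodup_iff.symm
        simp only [List.filter_cons, hsmall, Bool.not_false, if_true]
        exact congrArg Bool.not (decide_eq_decide.mpr hiff)

-- B's size comparison decides Nodup of the list of small caves.
lemma length_ofList_eq_iff (xs : List String) :
    (PySem.Set.ofList xs).length = xs.length ↔ xs.Nodup := by
  induction xs using List.reverseRecOn with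
  | nil => simp [PySem.Set.ofList]
  | append_singleton ys x ih =>
    rw [PySem.Set.ofList_append_singleton]
    by_cases hx : x ∈ ys
    · have hc : PySem.Set.contains (PySem.Set.ofList ys) x = true := by
        rw [PySem.Set.contains_iff]; exact (PySem.Set.mem_ofList ys x).mpr hx
      have hle : (PySem.Set.ofList ys).length ≤ ys.length := PySem.Set.length_ofList_le ys
      simp only [PySem.Set.add, hc, if_true]
      refine iff_of_false ?_ ?_
      · intro h; rw [List.length_append, List.length_singleton] at h; omega
      · intro h; exact List.disjoint_of_nodup_append h hx (by simp)
    · have hc : PySem.Set.contains (PySem.Set.ofList ys) x = false := by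
        rw [Bool.eq_false_iff]
        intro h
        exact hx ((PySem.Set.mem_ofList ys x).mp ((PySem.Set.contains_iff _ _).mp h))
      simp only [PySem.Set.add, hc, Bool.false_eq_true, if_false,
        List.length_append, List.length_singleton]
      constructor
      · intro h
        rw [List.nodup_append]
        refine ⟨ih.mp (by omega), List.nodup_singleton x, ?_⟩
        intro a ha b hb
        rw [List.mem_singleton] at hb
        subst hb
        exact fun hab => hx (hab ▸ ha)
      · intro h
        have := ih.mpr (List.nodup_append.mp h).1
        omega

-- ===== VERDICT (by name: the statement is the Claim_ definition above) =====
theorem has_double_small_spec : Claim_equal_has_double_small := by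
  intro path _
  unfold Spec_has_double_small has_double_small has_double_small_alt
  rw [hdsLoop_spec path PySem.Dict.empty [] List.nodup_nil
    (by intro c; simp [PySem.Dict.getD_empty])]
  simp only [List.nil_append]
  by_cases hnd : (path.filter (fun c => !is_big c)).Nodup
  · have hlen := (length_ofList_eq_iff (path.filter (fun c => !is_big c))).mpr hnd
    simp [hnd, hlen]
  · have hlen : (path.filter (fun c => !is_big c)).length ≠
        (PySem.Set.ofList (path.filter (fun c => !is_big c))).length := by
      intro h
      exact hnd ((length_ofList_eq_iff (path.filter (fun c => !is_big c))).mp h.symm)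
    simp [hnd, hlen]
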